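-- pv_equiv track=rewrite | github.com/ChestnutMongrel/advent-of-code | 2015/24_day.py | part_one
-- ===== SOURCE A (Python) =====
-- from itertools import combinations
-- from math import prod
--
-- def part_one(data: tuple, groups_amount: int) -> int | None:
--     group_weight = sum(data) // groups_amount
--
--     for i in range(len(data)):
--         qe = set()
--         for numbers in combinations(data, i):
--             if sum(numbers) == group_weight:
--                 qe.add(prod(numbers))
--         if qe:
--             return min(qe)
--
--     return None
-- ===== SOURCE B (Python) =====
-- def part_one(data, groups_amount):
--     target = sum(data) // groups_amount
--     n = len(data)
--     states = [(0, 0, 1)]  # (count, sum, product) for every subset seen so far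
--     for x in data:
--         states += [(c + 1, s + x, p * x) for c, s, p in states]
--     best = None
--     for c, s, p in states:
--         if s == target and c < n:
--             if best is None or (c, p) < best:
--                 best = (c, p)
--     return None if best is None else best[1]
-- ===== Notes on version B (the rewrite author's own statement) =====
-- stated objective: alternative
-- what changed: A re-enumerates itertools.combinations per subset size and builds a set of products per size; B builds all subset (count, sum, product) states in one incremental fold and takes a single lexicographic (count, product) minimum pass over the candidates.
-- outside the precondition, e.g. on part_one((1, 2, 3), 0): A raises ZeroDivisionError, B raises ZeroDivisionError
import Mathlib
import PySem

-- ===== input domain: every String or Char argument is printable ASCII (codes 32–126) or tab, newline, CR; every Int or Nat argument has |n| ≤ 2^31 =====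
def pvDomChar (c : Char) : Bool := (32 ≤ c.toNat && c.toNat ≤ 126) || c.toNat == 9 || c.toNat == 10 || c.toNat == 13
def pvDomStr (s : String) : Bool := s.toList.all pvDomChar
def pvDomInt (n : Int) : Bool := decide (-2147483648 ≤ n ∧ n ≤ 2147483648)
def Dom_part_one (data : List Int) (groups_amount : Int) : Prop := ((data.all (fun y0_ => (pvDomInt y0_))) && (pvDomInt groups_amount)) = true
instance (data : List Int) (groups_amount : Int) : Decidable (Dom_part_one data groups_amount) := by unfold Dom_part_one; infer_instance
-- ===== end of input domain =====

-- B replaces A's per-size re-enumeration of itertools.combinations (with a set of products per size)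
-- by one incremental fold building all subset (count,sum,product) states, followed by a single
-- lexicographic (count, product) minimum pass; objective: alternative structure, equal results.

-- ===== PORT A =====
-- the 'for i in range(len(data))' loop of A, over the remaining sizes
def part_one_loop (data : List Int) (gw : Int) : List Nat → Option Int
  | [] => none
  | i :: rest =>
    let qe : PySem.Set Int :=
      (PySem.List.combinations data i).foldl
        (fun s numbers => if numbers.sum = gw then PySem.Set.add s numbers.prod else s)
        PySem.Set.empty
    if qe ≠ [] then PySem.List.min? qe (fun x => x)
    else part_one_loop data gw rest

def part_one (data : List Int) (groups_amount : Int) : Option Int :=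
  let group_weight := PySem.Int.floordiv data.sum groups_amount
  part_one_loop data group_weight (List.range data.length)

-- ===== PORT B =====
def part_one_alt (data : List Int) (groups_amount : Int) : Option Int :=
  let target := PySem.Int.floordiv data.sum groups_amount
  let n : Int := data.length
  let states : List (Int × Int × Int) :=
    data.foldl (fun st x => st ++ st.map (fun t => (t.1 + 1, t.2.1 + x, t.2.2 * x))) [(0, 0, 1)]
  let best : Option (Int × Int) :=
    states.foldl
      (fun b t =>
        if t.2.1 = target ∧ t.1 < n then
          match b with
          | none => some (t.1, t.2.2)
          | some bb => if t.1 < bb.1 ∨ (t.1 = bb.1 ∧ t.2.2 < bb.2) then some (t.1, t.2.2) else some bb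
        else b)
      none
  match best with
  | none => none
  | some bb => some bb.2

-- ===== PRECONDITION & SPEC =====
-- Pre_ excludes exactly groups_amount = 0, on which A raises ZeroDivisionError.
def Pre_part_one (data : List Int) (groups_amount : Int) : Prop := groups_amount ≠ 0
instance (data : List Int) (groups_amount : Int) : Decidable (Pre_part_one data groups_amount) := by unfold Pre_part_one; infer_instance
def pvWitness_part_one : List Int × Int := ([1, 2, 3], 3)

def Spec_part_one (data : List Int) (groups_amount : Int) (out : Option Int) : Prop := out = part_one_alt data groups_amount
instance (data : List Int) (groups_amount : Int) (out : Option Int) : Decidable (Spec_part_one data groups_amount out) := by unfold Spec_part_one; infer_instance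

-- ===== CLAIM (what is proved, stated in full; the proofs are below) =====
def Claim_equal_part_one : Prop := ∀ (data : List Int) (groups_amount : Int), Dom_part_one data groups_amount → Pre_part_one data groups_amount → Spec_part_one data groups_amount (part_one data groups_amount)

-- ===== LEMMAS AND PROOFS =====

-- the candidate set: (count, product) of proper sublists of data summing to gw
def pvC (data : List Int) (gw : Int) (c p : Int) : Prop :=
  ∃ t : List Int, t.Sublist data ∧ t.sum = gw ∧ (t.length : Int) = c ∧ t.prod = p ∧ t.length < data.length

def pvLexLe (a b : Int × Int) : Prop := a.1 < b.1 ∨ (a.1 = b.1 ∧ a.2 ≤ b.2)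

-- characterization of an Option Int result as "lex-minimal candidate's product"
def pvRel (data : List Int) (gw : Int) (r : Option Int) : Prop :=
  (r = none ∧ ∀ c p, ¬ pvC data gw c p) ∨
  (∃ c p, r = some p ∧ pvC data gw c p ∧ ∀ c' p', pvC data gw c' p' → pvLexLe (c, p) (c', p'))

theorem pv_mem_foldl_states (l : List Int) : ∀ (st0 : List (Int × Int × Int)) (x : Int × Int × Int),
    x ∈ l.foldl (fun st x => st ++ st.map (fun t => (t.1 + 1, t.2.1 + x, t.2.2 * x))) st0 ↔
    ∃ y ∈ st0, ∃ t : List Int, t.Sublist l ∧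
      x = (y.1 + t.length, y.2.1 + t.sum, y.2.2 * t.prod) := by
  induction l with
  | nil =>
    intro st0 x
    simp only [List.foldl_nil]
    constructor
    · intro hx; exact ⟨x, hx, [], List.Sublist.refl _, by simp⟩
    · rintro ⟨y, hy, t, ht, hx⟩
      rw [List.sublist_nil] at ht
      subst ht
      have : x = y := by simpa using hx
      subst this; exact hy
  | cons a l ih =>
    intro st0 x
    rw [List.foldl_cons, ih]
    constructor
    · rintro ⟨y, hy, t, ht, hx⟩
      rcases List.mem_append.1 hy with hy | hy
      · exact ⟨y, hy, t, ht.cons a, hx⟩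
      · rcases List.mem_map.1 hy with ⟨y0, hy0, rfl⟩
        refine ⟨y0, hy0, a :: t, List.Sublist.cons₂ a ht, ?_⟩
        simp only [hx, List.length_cons, List.sum_cons, List.prod_cons]
        refine Prod.ext ?_ (Prod.ext ?_ ?_) <;> simp <;> ring
    · rintro ⟨y, hy, t, ht, hx⟩
      rcases List.sublist_cons_iff.1 ht with ht | ⟨r, rfl, hr⟩
      · exact ⟨y, List.mem_append_left _ hy, t, ht, hx⟩
      · refine ⟨(y.1 + 1, y.2.1 + a, y.2.2 * a), List.mem_append_right _ (List.mem_map.2 ⟨y, hy, rfl⟩), r, hr, ?_⟩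
        simp only [hx, List.length_cons, List.sum_cons, List.prod_cons]
        refine Prod.ext ?_ (Prod.ext ?_ ?_) <;> simp <;> ring

theorem pv_mem_states (data : List Int) (x : Int × Int × Int) :
    x ∈ data.foldl (fun st x => st ++ st.map (fun t => (t.1 + 1, t.2.1 + x, t.2.2 * x))) [(0, 0, 1)] ↔
    ∃ t : List Int, t.Sublist data ∧ x = ((t.length : Int), t.sum, t.prod) := by
  rw [pv_mem_foldl_states]
  constructor
  · rintro ⟨y, hy, t, ht, hx⟩
    simp only [List.mem_singleton] at hy
    subst hy
    exact ⟨t, ht, by simpa using hx⟩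
  · rintro ⟨t, ht, hx⟩
    exact ⟨(0, 0, 1), List.mem_singleton.2 rfl, t, ht, by simpa using hx⟩

theorem pv_mem_foldl_add_if (gw : Int) : ∀ (L : List (List Int)) (s0 : PySem.Set Int) (p : Int),
    p ∈ L.foldl (fun s numbers => if numbers.sum = gw then PySem.Set.add s numbers.prod else s) s0 ↔
    p ∈ s0 ∨ ∃ t ∈ L, t.sum = gw ∧ t.prod = p := by
  intro L
  induction L with
  | nil => intro s0 p; simp
  | cons u L ih =>
    intro s0 p
    rw [List.foldl_cons, ih]
    by_cases h : u.sum = gw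
    · simp only [if_pos h, PySem.Set.mem_add, List.mem_cons]
      constructor
      · rintro (⟨hs | rfl⟩ | ⟨t, ht, hsum, hprod⟩)
        · exact Or.inl hs
        · exact Or.inr ⟨u, Or.inl rfl, h, rfl⟩
        · exact Or.inr ⟨t, Or.inr ht, hsum, hprod⟩
      · rintro (hs | ⟨t, rfl | ht, hsum, hprod⟩)
        · exact Or.inl (Or.inl hs)
        · exact Or.inl (Or.inr hprod.symm)
        · exact Or.inr ⟨t, ht, hsum, hprod⟩
    · simp only [if_neg h, List.mem_cons]
      constructor
      · rintro (hs | ⟨t, ht, hsum, hprod⟩)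
        · exact Or.inl hs
        · exact Or.inr ⟨t, Or.inr ht, hsum, hprod⟩
      · rintro (hs | ⟨t, rfl | ht, hsum, hprod⟩)
        · exact Or.inl hs
        · exact absurd hsum h
        · exact Or.inr ⟨t, ht, hsum, hprod⟩

theorem pv_mem_qe (data : List Int) (gw : Int) (i : Nat) (p : Int) :
    p ∈ (PySem.List.combinations data i).foldl
        (fun s numbers => if numbers.sum = gw then PySem.Set.add s numbers.prod else s)
        PySem.Set.empty ↔
    ∃ t : List Int, t.Sublist data ∧ t.length = i ∧ t.sum = gw ∧ t.prod = p := by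
  rw [pv_mem_foldl_add_if]
  simp only [PySem.Set.empty, List.not_mem_nil, false_or, PySem.List.mem_combinations_iff]
  constructor
  · rintro ⟨t, ⟨hsub, hlen⟩, hsum, hprod⟩
    exact ⟨t, hsub, hlen, hsum, hprod⟩
  · rintro ⟨t, hsub, hlen, hsum, hprod⟩
    exact ⟨t, ⟨hsub, hlen⟩, hsum, hprod⟩

theorem pv_hfold_spec : ∀ (l : List (Int × Int)) (b : Int × Int),
    (l.foldl (fun b y => if y.1 < b.1 ∨ (y.1 = b.1 ∧ y.2 < b.2) then y else b) b = b ∨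
     l.foldl (fun b y => if y.1 < b.1 ∨ (y.1 = b.1 ∧ y.2 < b.2) then y else b) b ∈ l) ∧
    pvLexLe (l.foldl (fun b y => if y.1 < b.1 ∨ (y.1 = b.1 ∧ y.2 < b.2) then y else b) b) b ∧
    ∀ y ∈ l, pvLexLe (l.foldl (fun b y => if y.1 < b.1 ∨ (y.1 = b.1 ∧ y.2 < b.2) then y else b) b) y := by
  intro l
  induction l with
  | nil => intro b; exact ⟨Or.inl rfl, Or.inr ⟨rfl, le_refl _⟩, by simp⟩
  | cons z l ih =>
    intro b
    rw [List.foldl_cons]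
    by_cases hc : z.1 < b.1 ∨ (z.1 = b.1 ∧ z.2 < b.2)
    · rw [if_pos hc]
      rcases ih z with ⟨hmem, hle, hall⟩
      refine ⟨?_, ?_, ?_⟩
      · rcases hmem with h | h
        · exact Or.inr (by rw [h]; exact List.mem_cons_self)
        · exact Or.inr (List.mem_cons_of_mem _ h)
      · unfold pvLexLe at hle ⊢; omega
      · intro y hy
        rcases List.mem_cons.1 hy with rfl | hy
        · exact hle
        · exact hall y hy
    · rw [if_neg hc]
      rcases ih b with ⟨hmem, hle, hall⟩
      refine ⟨?_, ?_, ?_⟩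
      · rcases hmem with h | h
        · exact Or.inl h
        · exact Or.inr (List.mem_cons_of_mem _ h)
      · exact hle
      · intro y hy
        rcases List.mem_cons.1 hy with rfl | hy
        · unfold pvLexLe at hle ⊢; omega
        · exact hall y hy

theorem pv_gfold_some : ∀ (l : List (Int × Int)) (b : Int × Int),
    l.foldl (fun b y => match b with
      | none => some y
      | some bb => if y.1 < bb.1 ∨ (y.1 = bb.1 ∧ y.2 < bb.2) then some y else some bb) (some b) =
    some (l.foldl (fun b y => if y.1 < b.1 ∨ (y.1 = b.1 ∧ y.2 < b.2) then y else b) b) := by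
  intro l
  induction l with
  | nil => intro b; rfl
  | cons z l ih =>
    intro b
    rw [List.foldl_cons, List.foldl_cons]
    have : (match some b with
        | none => some z
        | some bb => if z.1 < bb.1 ∨ (z.1 = bb.1 ∧ z.2 < bb.2) then some z else some bb) =
        some (if z.1 < b.1 ∨ (z.1 = b.1 ∧ z.2 < b.2) then z else b) := by
      show (if z.1 < b.1 ∨ (z.1 = b.1 ∧ z.2 < b.2) then some z else some b) =
        some (if z.1 < b.1 ∨ (z.1 = b.1 ∧ z.2 < b.2) then z else b)
      split_ifs <;> rfl
    rw [this, ih]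

theorem pv_loop_spec (data : List Int) (gw : Int) : ∀ (k i : Nat), i + k = data.length →
    (∀ c p, pvC data gw c p → (i : Int) ≤ c) →
    pvRel data gw (part_one_loop data gw (List.range' i k)) := by
  intro k
  induction k with
  | zero =>
    intro i hik hlow
    rw [List.range'_zero]
    left
    refine ⟨rfl, ?_⟩
    rintro c p hC
    have h1 := hlow c p hC
    rcases hC with ⟨t, _, _, hc, _, hlen⟩
    omega
  | succ k ih =>
    intro i hik hlow
    rw [List.range'_succ]
    simp only [part_one_loop]
    by_cases hne : (PySem.List.combinations data i).foldl
        (fun s numbers => if numbers.sum = gw then PySem.Set.add s numbers.prod else s)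
        PySem.Set.empty ≠ []
    · rw [if_pos hne]
      cases hmin : PySem.List.min? ((PySem.List.combinations data i).foldl
          (fun s numbers => if numbers.sum = gw then PySem.Set.add s numbers.prod else s)
          PySem.Set.empty) (fun x => x) with
      | none => exact absurd ((PySem.List.min?_eq_none_iff _ _).1 hmin) hne
      | some m =>
        right
        refine ⟨(i : Int), m, rfl, ?_, ?_⟩
        · have hm := PySem.List.min?_mem hmin
          rcases (pv_mem_qe data gw i m).1 hm with ⟨t, hsub, hlen, hsum, hprod⟩
          exact ⟨t, hsub, hsum, by rw [hlen], hprod, by omega⟩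
        · intro c' p' hC'
          rcases eq_or_lt_of_le (hlow c' p' hC') with heq | hlt
          · right
            refine ⟨heq, ?_⟩
            rcases hC' with ⟨t', hsub', hsum', hc', hp', _⟩
            have hlen' : t'.length = i := by omega
            have hmem' : p' ∈ (PySem.List.combinations data i).foldl
                (fun s numbers => if numbers.sum = gw then PySem.Set.add s numbers.prod else s)
                PySem.Set.empty := (pv_mem_qe data gw i p').2 ⟨t', hsub', hlen', hsum', hp'⟩
            exact PySem.List.min?_isMin hmin p' hmem'
          · exact Or.inl hlt
    · rw [if_neg hne]
      rw [not_not] at hne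
      apply ih (i + 1) (by omega)
      intro c p hC
      have h1 := hlow c p hC
      rcases eq_or_lt_of_le h1 with heq | hlt
      · exfalso
        rcases hC with ⟨t, hsub, hsum, hc, hp, _⟩
        have hlen : t.length = i := by omega
        have : t.prod ∈ (PySem.List.combinations data i).foldl
            (fun s numbers => if numbers.sum = gw then PySem.Set.add s numbers.prod else s)
            PySem.Set.empty := (pv_mem_qe data gw i t.prod).2 ⟨t, hsub, hlen, hsum, rfl⟩
        rw [hne] at this
        exact List.not_mem_nil this
      · push_cast
        omega

theorem pv_mem_cands (data : List Int) (gw : Int) (y : Int × Int) :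
    y ∈ (((data.foldl (fun st x => st ++ st.map (fun t => (t.1 + 1, t.2.1 + x, t.2.2 * x))) [(0, 0, 1)]).filter
        (fun t => decide (t.2.1 = gw ∧ t.1 < (data.length : Int)))).map (fun t => (t.1, t.2.2))) ↔
    pvC data gw y.1 y.2 := by
  simp only [List.mem_map, List.mem_filter, decide_eq_true_eq, pv_mem_states]
  constructor
  · rintro ⟨t, ⟨⟨u, hsub, rfl⟩, hsum, hlt⟩, rfl⟩
    refine ⟨u, hsub, hsum, rfl, rfl, ?_⟩
    have hlt' : (u.length : Int) < (data.length : Int) := hlt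
    exact_mod_cast hlt'
  · rintro ⟨u, hsub, hsum, hc, hp, hlen⟩
    refine ⟨((u.length : Int), u.sum, u.prod), ⟨⟨u, hsub, rfl⟩, hsum, ?_⟩, by rw [hc, hp]⟩
    show (u.length : Int) < (data.length : Int)
    exact_mod_cast hlen

theorem pv_alt_fold_eq (gw n : Int) : ∀ (L : List (Int × Int × Int)) (b0 : Option (Int × Int)),
    L.foldl
      (fun b t =>
        if t.2.1 = gw ∧ t.1 < n then
          match b with
          | none => some (t.1, t.2.2)
          | some bb => if t.1 < bb.1 ∨ (t.1 = bb.1 ∧ t.2.2 < bb.2) then some (t.1, t.2.2) else some bb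
        else b)
      b0 =
    ((L.filter (fun t => decide (t.2.1 = gw ∧ t.1 < n))).map (fun t => (t.1, t.2.2))).foldl
      (fun b y => match b with
        | none => some y
        | some bb => if y.1 < bb.1 ∨ (y.1 = bb.1 ∧ y.2 < bb.2) then some y else some bb)
      b0 := by
  intro L
  induction L with
  | nil => intro b0; rfl
  | cons u L ih =>
    intro b0
    rw [List.foldl_cons, List.filter_cons]
    by_cases h : u.2.1 = gw ∧ u.1 < n
    · rw [if_pos h, if_pos (by exact decide_eq_true h), List.map_cons, List.foldl_cons, ih]
    · rw [if_neg h, if_neg (by simpa using h), ih]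

theorem pv_alt_spec (data : List Int) (g : Int) :
    pvRel data (PySem.Int.floordiv data.sum g) (part_one_alt data g) := by
  simp only [part_one_alt]
  rw [pv_alt_fold_eq]
  cases hc : ((data.foldl (fun st x => st ++ st.map (fun t => (t.1 + 1, t.2.1 + x, t.2.2 * x)))
        [(0, 0, 1)]).filter
      (fun t => decide (t.2.1 = PySem.Int.floordiv data.sum g ∧ t.1 < (data.length : Int)))).map
      (fun t => (t.1, t.2.2)) with
  | nil =>
    left
    refine ⟨rfl, ?_⟩
    rintro c p hC
    have : (c, p) ∈ (((data.foldl (fun st x => st ++ st.map (fun t => (t.1 + 1, t.2.1 + x, t.2.2 * x)))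
        [(0, 0, 1)]).filter
        (fun t => decide (t.2.1 = PySem.Int.floordiv data.sum g ∧ t.1 < (data.length : Int)))).map
        (fun t => (t.1, t.2.2))) := (pv_mem_cands data (PySem.Int.floordiv data.sum g) (c, p)).2 hC
    rw [hc] at this
    exact List.not_mem_nil this
  | cons y l =>
    rw [List.foldl_cons, pv_gfold_some]
    right
    rcases pv_hfold_spec l y with ⟨hmem, hle, hall⟩
    set m := l.foldl (fun b y => if y.1 < b.1 ∨ (y.1 = b.1 ∧ y.2 < b.2) then y else b) y with hm
    have hmemc : m ∈ (((data.foldl (fun st x => st ++ st.map (fun t => (t.1 + 1, t.2.1 + x, t.2.2 * x)))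
        [(0, 0, 1)]).filter
        (fun t => decide (t.2.1 = PySem.Int.floordiv data.sum g ∧ t.1 < (data.length : Int)))).map
        (fun t => (t.1, t.2.2))) := by
      rw [hc]
      rcases hmem with h | h
      · rw [h]; exact List.mem_cons_self
      · exact List.mem_cons_of_mem _ h
    refine ⟨m.1, m.2, rfl, (pv_mem_cands data (PySem.Int.floordiv data.sum g) m).1 hmemc, ?_⟩
    intro c' p' hC'
    have hin : (c', p') ∈ (((data.foldl (fun st x => st ++ st.map (fun t => (t.1 + 1, t.2.1 + x, t.2.2 * x)))
        [(0, 0, 1)]).filter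
        (fun t => decide (t.2.1 = PySem.Int.floordiv data.sum g ∧ t.1 < (data.length : Int)))).map
        (fun t => (t.1, t.2.2))) := (pv_mem_cands data (PySem.Int.floordiv data.sum g) (c', p')).2 hC'
    rw [hc] at hin
    rcases List.mem_cons.1 hin with heq | hin
    · rw [← heq] at hle; exact hle
    · exact hall _ hin

-- ===== VERDICT (by name: the statement is the Claim_ definition above) =====
theorem part_one_spec : Claim_equal_part_one := by
  intro data g _ _
  unfold Spec_part_one
  show part_one_loop data (PySem.Int.floordiv data.sum g) (List.range data.length) = part_one_alt data g
  have hA := pv_loop_spec data (PySem.Int.floordiv data.sum g) data.length 0 (by omega)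
    (by rintro c p ⟨t, _, _, hc, _⟩; omega)
  have hB := pv_alt_spec data g
  rw [List.range_eq_range']
  rcases hA with ⟨ha, hemptyA⟩ | ⟨c, p, ha, hcA, hminA⟩ <;>
    rcases hB with ⟨hb, hemptyB⟩ | ⟨c', p', hb, hcB, hminB⟩
  · simp only [ha, hb]
  · exact absurd hcB (hemptyA c' p')
  · exact absurd hcA (hemptyB c p)
  · have h1 := hminA c' p' hcB
    have h2 := hminB c p hcA
    have : p = p' := by
      unfold pvLexLe at h1 h2; simp at h1 h2; omega
    simp only [ha, hb, this]
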